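-- pv_equiv track=rewrite | github.com/dfo-meds/cnodc | src/cnodc/programs/dmd/metadata.py | autodetect_resource_type
-- ===== SOURCE A (Python) =====
-- import typing as t
--
-- def autodetect_resource_type(full_url: t.Optional[dict]):
--     if full_url is None:
--         return None
--     url = ""
--     if 'und' in full_url:
--         url = full_url['und']
--     elif 'en' in full_url:
--         url = full_url['en']
--     else:
--         for key in full_url.keys():
--             url = full_url[key]
--             break
--     if url.startswith("https://"):
--         return "https"
--     elif url.startswith("http://"):
--         return "http"
--     elif url.startswith(("ftp://", "ftps://", "ftpse://")):
--         return "ftp"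
--     elif url.startswith("git://"):
--         return 'git'
--     elif url.startswith("file://"):
--         return 'file'
--     return None
-- ===== SOURCE B (Python) =====
-- import typing as t
--
-- _SCHEME_TYPE = {'https': 'https', 'http': 'http', 'ftp': 'ftp', 'ftps': 'ftp',
--                 'ftpse': 'ftp', 'git': 'git', 'file': 'file'}
--
-- def autodetect_resource_type(full_url: t.Optional[dict]):
--     if full_url is None:
--         return None
--     # single pass: keep the value whose key has the best priority (und < en < first entry)
--     best, url = 4, ""
--     for i, (key, value) in enumerate(full_url.items()):
--         pr = 0 if key == 'und' else 1 if key == 'en' else 2 if i == 0 else 3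
--         if pr < best:
--             best, url = pr, value
--     # scan the maximal leading alphabetic run; it must be immediately followed by '://'
--     n = 0
--     while n < len(url) and url[n].isalpha():
--         n += 1
--     if url[n:n + 3] != '://':
--         return None
--     return _SCHEME_TYPE.get(url[:n])
-- ===== Notes on version B (the rewrite author's own statement) =====
-- stated objective: alternative
-- what changed: URL selection becomes one enumerated fold that keeps the value of minimal key priority (und < en < first entry) instead of staged membership tests, and the startswith cascade becomes a scan of the maximal leading alphabetic run that must be followed by '://', with one exact lookup of that run in a constant scheme table.
import Mathlib
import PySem

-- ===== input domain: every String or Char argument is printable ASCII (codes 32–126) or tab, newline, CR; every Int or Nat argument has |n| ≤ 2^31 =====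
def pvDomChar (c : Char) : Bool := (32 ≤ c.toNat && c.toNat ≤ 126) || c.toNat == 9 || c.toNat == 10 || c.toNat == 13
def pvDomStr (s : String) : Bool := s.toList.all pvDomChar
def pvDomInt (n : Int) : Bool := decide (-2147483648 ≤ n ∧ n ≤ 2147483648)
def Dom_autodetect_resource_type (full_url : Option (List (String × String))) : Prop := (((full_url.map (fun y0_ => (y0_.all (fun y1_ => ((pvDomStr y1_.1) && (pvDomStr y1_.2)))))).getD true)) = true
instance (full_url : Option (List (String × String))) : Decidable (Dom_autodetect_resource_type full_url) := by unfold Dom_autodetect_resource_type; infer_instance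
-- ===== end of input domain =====

-- B selects the URL in one enumerated fold minimizing a key priority (und < en < first entry) and classifies it by scanning the maximal leading alphabetic run and looking it up exactly in a scheme table (alternative decomposition, same cost).


-- ===== PORT A =====
def autodetect_resource_type (full_url : Option (List (String × String))) : Option String :=
  match full_url with
  | none => none
  | some fu =>
    let d := PySem.Dict.mk fu
    let url :=
      if d.contains "und" then d.getD "und" ""
      else if d.contains "en" then d.getD "en" ""
      else
        match d.keys with        -- for key in full_url.keys(): url = full_url[key]; break
        | [] => ""
        | key :: _ => d.getD key ""
    if PySem.Str.startswith url "https://" then some "https"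
    else if PySem.Str.startswith url "http://" then some "http"
    else if PySem.Str.startswith url "ftp://" || PySem.Str.startswith url "ftps://"
            || PySem.Str.startswith url "ftpse://" then some "ftp"
    else if PySem.Str.startswith url "git://" then some "git"
    else if PySem.Str.startswith url "file://" then some "file"
    else none

-- ===== PORT B =====
-- the constant scheme table _SCHEME_TYPE of Source B
def pvSchemeType : PySem.Dict String String :=
  PySem.Dict.mk [("https", "https"), ("http", "http"), ("ftp", "ftp"), ("ftps", "ftp"),
                 ("ftpse", "ftp"), ("git", "git"), ("file", "file")]

-- the body of Source B's for-loop: fold step over enumerate(full_url.items())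
def pvSelStep (b : Int × String) (kv : Int × (String × String)) : Int × String :=
  let pr : Int := if kv.2.1 = "und" then 0 else if kv.2.1 = "en" then 1
                  else if kv.1 = 0 then 2 else 3
  if pr < b.1 then (pr, kv.2.2) else b

-- Source B's while loop: split off the maximal leading run of alphabetic characters
def alphaSpan : List Char → List Char × List Char
  | [] => ([], [])
  | c :: t =>
    if PySem.Chars.isalpha c then
      let p := alphaSpan t
      (c :: p.1, p.2)
    else ([], c :: t)

def autodetect_resource_type_alt (full_url : Option (List (String × String))) : Option String :=
  match full_url with
  | none => none
  | some fu =>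
    let url := ((PySem.List.enumerate fu 0).foldl pvSelStep (4, "")).2
    let p := alphaSpan url.toList              -- url[:n], url[n:]
    if p.2.take 3 = "://".toList               -- url[n:n+3] == '://'
    then pvSchemeType.get? (String.ofList p.1) -- _SCHEME_TYPE.get(url[:n])
    else none

-- ===== PRECONDITION & SPEC =====
def Spec_autodetect_resource_type (full_url : Option (List (String × String))) (out : Option String) : Prop := out = autodetect_resource_type_alt full_url
instance (full_url : Option (List (String × String))) (out : Option String) : Decidable (Spec_autodetect_resource_type full_url out) := by unfold Spec_autodetect_resource_type; infer_instance

-- ===== CLAIM (what is proved, stated in full; the proofs are below) =====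
def Claim_equal_autodetect_resource_type : Prop := ∀ (full_url : Option (List (String × String))), Dom_autodetect_resource_type full_url → Spec_autodetect_resource_type full_url (autodetect_resource_type full_url)

-- ===== LEMMAS AND PROOFS =====

-- once priority 0 is reached, the fold never changes state
lemma sel0 (t : List (String × String)) : ∀ (m : Int) (u : String),
    (PySem.List.enumerate t m).foldl pvSelStep (0, u) = (0, u) := by
  induction t with
  | nil => intro m u; rfl
  | cons h tl ih =>
    intro m u
    rw [PySem.List.enumerate_cons, List.foldl_cons]
    have hs : pvSelStep (0, u) (m, h) = (0, u) := by
      simp only [pvSelStep]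
      split_ifs <;> first | rfl | exact False.elim ‹False› | omega
    rw [hs, ih]

-- from priority 1 only an 'und' key can take over
lemma sel1 (t : List (String × String)) : ∀ (m : Int) (u : String), 1 ≤ m →
    (PySem.List.enumerate t m).foldl pvSelStep (1, u) =
      (match t.find? (fun p => p.1 == "und") with
       | some kv => (0, kv.2)
       | none => (1, u)) := by
  induction t with
  | nil => intro m u _; rfl
  | cons h tl ih =>
    intro m u hm
    rw [PySem.List.enumerate_cons, List.foldl_cons]
    by_cases hk : h.1 = "und"
    · have hs : pvSelStep (1, u) (m, h) = (0, h.2) := by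
        simp [pvSelStep, hk]
      rw [hs, sel0, List.find?_cons_of_pos (by simp [hk])]
    · have hs : pvSelStep (1, u) (m, h) = (1, u) := by
        simp only [pvSelStep, hk]
        split_ifs <;> first | rfl | exact False.elim ‹False› | omega
      rw [hs, ih _ u (by omega), List.find?_cons_of_neg (by simp [hk])]

-- from priority 2 only 'und' or 'en' can take over
lemma sel2 (t : List (String × String)) : ∀ (m : Int) (u : String), 1 ≤ m →
    (PySem.List.enumerate t m).foldl pvSelStep (2, u) =
      (match t.find? (fun p => p.1 == "und") with
       | some kv => (0, kv.2)
       | none =>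
         match t.find? (fun p => p.1 == "en") with
         | some kv => (1, kv.2)
         | none => (2, u)) := by
  induction t with
  | nil => intro m u _; rfl
  | cons h tl ih =>
    intro m u hm
    rw [PySem.List.enumerate_cons, List.foldl_cons]
    by_cases hk : h.1 = "und"
    · have hs : pvSelStep (2, u) (m, h) = (0, h.2) := by
        simp [pvSelStep, hk]
      rw [hs, sel0, List.find?_cons_of_pos (by simp [hk])]
    · by_cases he : h.1 = "en"
      · have hs : pvSelStep (2, u) (m, h) = (1, h.2) := by
          simp [pvSelStep, he]
        rw [hs, sel1 _ _ _ (by omega), List.find?_cons_of_neg (by simp [hk]),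
            List.find?_cons_of_pos (by simp [he])]
      · have hs : pvSelStep (2, u) (m, h) = (2, u) := by
          simp only [pvSelStep, hk, he]
          split_ifs <;> first | rfl | exact False.elim ‹False› | omega
        rw [hs, ih _ u (by omega), List.find?_cons_of_neg (by simp [hk]),
            List.find?_cons_of_neg (by simp [he])]

-- A's staged key preference equals B's priority-minimizing fold
lemma sel_eq (fu : List (String × String)) :
    (if (PySem.Dict.mk fu).contains "und" then (PySem.Dict.mk fu).getD "und" ""
     else if (PySem.Dict.mk fu).contains "en" then (PySem.Dict.mk fu).getD "en" ""
     else
       match (PySem.Dict.mk fu).keys with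
       | [] => ""
       | key :: _ => (PySem.Dict.mk fu).getD key "")
    = ((PySem.List.enumerate fu 0).foldl pvSelStep (4, "")).2 := by
  cases fu with
  | nil => rfl
  | cons h t =>
    rw [PySem.List.enumerate_cons, List.foldl_cons]
    simp only [PySem.Dict.contains, PySem.Dict.getD, PySem.Dict.get?, PySem.Dict.keys,
               List.any_cons, List.map_cons]
    by_cases hk : h.1 = "und"
    · have hs : pvSelStep (4, "") (0, h) = (0, h.2) := by simp [pvSelStep, hk]
      rw [hs, sel0, List.find?_cons_of_pos (by simp [hk])]
      simp [hk]
    · have hku : ¬ ((fun p => p.1 == "und") h = true) := by simp [hk]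
      rcases hu : t.find? (fun p => p.1 == "und") with _ | kv
      · -- no 'und' anywhere
        have hanyu : (t.any fun p => p.1 == "und") = false := by
          rw [Bool.eq_false_iff]
          intro hcontra
          obtain ⟨x, hx, hpx⟩ := List.any_eq_true.mp hcontra
          have := List.find?_eq_none.mp hu x hx
          exact this hpx
        by_cases he : h.1 = "en"
        · have hs : pvSelStep (4, "") (0, h) = (1, h.2) := by simp [pvSelStep, he]
          rw [hs, sel1 _ _ _ (by omega), hu]
          rw [List.find?_cons_of_pos (p := fun q : String × String => q.1 == "en") (by simp [he])]
          simp [hanyu, he]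
        · have hke : ¬ ((fun p => p.1 == "en") h = true) := by simp [he]
          have hs : pvSelStep (4, "") (0, h) = (2, h.2) := by
            simp only [pvSelStep]
            split_ifs <;> simp_all
          rw [hs, sel2 _ _ _ (by omega), hu]
          rcases he2 : t.find? (fun p => p.1 == "en") with _ | kw
          · have hanye : (t.any fun p => p.1 == "en") = false := by
              rw [Bool.eq_false_iff]
              intro hcontra
              obtain ⟨x, hx, hpx⟩ := List.any_eq_true.mp hcontra
              exact (List.find?_eq_none.mp he2 x hx) hpx
            rw [List.find?_cons_of_pos (p := fun q : String × String => q.1 == h.1) (by simp)]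
            simp [hk, he, hanyu, hanye, he2]
          · have hanye : (t.any fun p => p.1 == "en") = true :=
              List.any_eq_true.mpr ⟨kw, List.mem_of_find?_eq_some he2, by simpa using List.find?_some he2⟩
            rw [List.find?_cons_of_neg (p := fun q : String × String => q.1 == "en") (l := t) hke]
            simp [hk, hanyu, hanye, he2]
      · -- 'und' occurs in the tail
        have hanyu : (t.any fun p => p.1 == "und") = true :=
          List.any_eq_true.mpr ⟨kv, List.mem_of_find?_eq_some hu, by simpa using List.find?_some hu⟩
        have step : ((PySem.List.enumerate t (0+1)).foldl pvSelStep (pvSelStep (4, "") (0, h))).2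
            = kv.2 := by
          by_cases he : h.1 = "en"
          · have hs : pvSelStep (4, "") (0, h) = (1, h.2) := by simp [pvSelStep, he]
            rw [hs, sel1 _ _ _ (by omega), hu]
          · have hs : pvSelStep (4, "") (0, h) = (2, h.2) := by
              simp only [pvSelStep]
              split_ifs <;> simp_all
            rw [hs, sel2 _ _ _ (by omega), hu]
        rw [step, List.find?_cons_of_neg (p := fun q : String × String => q.1 == "und") (l := t) hku]
        simp [hanyu, hu]

-- l splits into its alphabetic head and the rest
lemma alphaSpan_append (l : List Char) : l = (alphaSpan l).1 ++ (alphaSpan l).2 := by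
  induction l with
  | nil => rfl
  | cons c t ih =>
    by_cases h : PySem.Chars.isalpha c
    · simp only [alphaSpan, if_pos h]
      exact congrArg (c :: ·) ih
    · simp [alphaSpan, if_neg h]

-- only the seven scheme keys are in B's table
lemma schemeType_keys (a : List Char) (v : String) (hv : pvSchemeType.get? (String.ofList a) = some v) :
    a = "https".toList ∨ a = "http".toList ∨ a = "ftp".toList ∨ a = "ftps".toList ∨
    a = "ftpse".toList ∨ a = "git".toList ∨ a = "file".toList := by
  simp only [pvSchemeType, PySem.Dict.get?, List.find?] at hv
  by_cases k0 : ("https" == String.ofList a) = true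
  · have ha : a = "https".toList := by
      have := congrArg String.toList (eq_of_beq k0)
      simpa using this.symm
    tauto
  · have kf0 : ("https" == String.ofList a) = false := by
      revert k0; cases ("https" == String.ofList a) <;> simp
    simp only [kf0] at hv
    by_cases k1 : ("http" == String.ofList a) = true
    · have ha : a = "http".toList := by
        have := congrArg String.toList (eq_of_beq k1)
        simpa using this.symm
      tauto
    · have kf1 : ("http" == String.ofList a) = false := by
        revert k1; cases ("http" == String.ofList a) <;> simp
      simp only [kf1] at hv
      by_cases k2 : ("ftp" == String.ofList a) = true
      · have ha : a = "ftp".toList := by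
          have := congrArg String.toList (eq_of_beq k2)
          simpa using this.symm
        tauto
      · have kf2 : ("ftp" == String.ofList a) = false := by
          revert k2; cases ("ftp" == String.ofList a) <;> simp
        simp only [kf2] at hv
        by_cases k3 : ("ftps" == String.ofList a) = true
        · have ha : a = "ftps".toList := by
            have := congrArg String.toList (eq_of_beq k3)
            simpa using this.symm
          tauto
        · have kf3 : ("ftps" == String.ofList a) = false := by
            revert k3; cases ("ftps" == String.ofList a) <;> simp
          simp only [kf3] at hv
          by_cases k4 : ("ftpse" == String.ofList a) = true
          · have ha : a = "ftpse".toList := by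
              have := congrArg String.toList (eq_of_beq k4)
              simpa using this.symm
            tauto
          · have kf4 : ("ftpse" == String.ofList a) = false := by
              revert k4; cases ("ftpse" == String.ofList a) <;> simp
            simp only [kf4] at hv
            by_cases k5 : ("git" == String.ofList a) = true
            · have ha : a = "git".toList := by
                have := congrArg String.toList (eq_of_beq k5)
                simpa using this.symm
              tauto
            · have kf5 : ("git" == String.ofList a) = false := by
                revert k5; cases ("git" == String.ofList a) <;> simp
              simp only [kf5] at hv
              by_cases k6 : ("file" == String.ofList a) = true
              · have ha : a = "file".toList := by
                  have := congrArg String.toList (eq_of_beq k6)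
                  simpa using this.symm
                tauto
              · have kf6 : ("file" == String.ofList a) = false := by
                  revert k6; cases ("file" == String.ofList a) <;> simp
                simp only [kf6] at hv
                simp at hv

-- A's startswith cascade equals B's alpha-run scan plus table lookup
lemma chain_eq_scan (l : List Char) :
    (if PySem.Chars.startswith l "https://".toList = true then some "https"
     else if PySem.Chars.startswith l "http://".toList = true then some "http"
     else if (PySem.Chars.startswith l "ftp://".toList || PySem.Chars.startswith l "ftps://".toList
              || PySem.Chars.startswith l "ftpse://".toList) = true then some "ftp"
     else if PySem.Chars.startswith l "git://".toList = true then some "git"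
     else if PySem.Chars.startswith l "file://".toList = true then some "file"
     else none)
    = (if (alphaSpan l).2.take 3 = "://".toList then
         pvSchemeType.get? (String.ofList (alphaSpan l).1) else none) := by
  by_cases h1 : PySem.Chars.startswith l "https://".toList = true
  · rw [if_pos h1]
    obtain ⟨r, rfl⟩ := (PySem.Chars.startswith_iff _ _).mp h1
    have hspan : alphaSpan ("https://".toList ++ r) = ("https".toList, ':' :: '/' :: '/' :: r) := by
      simp [alphaSpan, PySem.Chars.isalpha, PySem.Chars.isupper, PySem.Chars.islower]
    rw [hspan]
    simp [pvSchemeType, PySem.Dict.get?]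
  · rw [if_neg h1]
    by_cases h2 : PySem.Chars.startswith l "http://".toList = true
    · rw [if_pos h2]
      obtain ⟨r, rfl⟩ := (PySem.Chars.startswith_iff _ _).mp h2
      have hspan : alphaSpan ("http://".toList ++ r) = ("http".toList, ':' :: '/' :: '/' :: r) := by
        simp [alphaSpan, PySem.Chars.isalpha, PySem.Chars.isupper, PySem.Chars.islower]
      rw [hspan]
      simp [pvSchemeType, PySem.Dict.get?]
    · rw [if_neg h2]
      by_cases h3 : (PySem.Chars.startswith l "ftp://".toList || PySem.Chars.startswith l "ftps://".toList
              || PySem.Chars.startswith l "ftpse://".toList) = true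
      · rw [if_pos h3]
        rcases Bool.or_eq_true_iff.mp h3 with h34 | h3c
        · rcases Bool.or_eq_true_iff.mp h34 with h3a | h3b
          · obtain ⟨r, rfl⟩ := (PySem.Chars.startswith_iff _ _).mp h3a
            have hspan : alphaSpan ("ftp://".toList ++ r) = ("ftp".toList, ':' :: '/' :: '/' :: r) := by
              simp [alphaSpan, PySem.Chars.isalpha, PySem.Chars.isupper, PySem.Chars.islower]
            rw [hspan]
            simp [pvSchemeType, PySem.Dict.get?]
          · obtain ⟨r, rfl⟩ := (PySem.Chars.startswith_iff _ _).mp h3b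
            have hspan : alphaSpan ("ftps://".toList ++ r) = ("ftps".toList, ':' :: '/' :: '/' :: r) := by
              simp [alphaSpan, PySem.Chars.isalpha, PySem.Chars.isupper, PySem.Chars.islower]
            rw [hspan]
            simp [pvSchemeType, PySem.Dict.get?]
        · obtain ⟨r, rfl⟩ := (PySem.Chars.startswith_iff _ _).mp h3c
          have hspan : alphaSpan ("ftpse://".toList ++ r) = ("ftpse".toList, ':' :: '/' :: '/' :: r) := by
            simp [alphaSpan, PySem.Chars.isalpha, PySem.Chars.isupper, PySem.Chars.islower]
          rw [hspan]
          simp [pvSchemeType, PySem.Dict.get?]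
      · rw [if_neg h3]
        by_cases h6 : PySem.Chars.startswith l "git://".toList = true
        · rw [if_pos h6]
          obtain ⟨r, rfl⟩ := (PySem.Chars.startswith_iff _ _).mp h6
          have hspan : alphaSpan ("git://".toList ++ r) = ("git".toList, ':' :: '/' :: '/' :: r) := by
            simp [alphaSpan, PySem.Chars.isalpha, PySem.Chars.isupper, PySem.Chars.islower]
          rw [hspan]
          simp [pvSchemeType, PySem.Dict.get?]
        · rw [if_neg h6]
          by_cases h7 : PySem.Chars.startswith l "file://".toList = true
          · rw [if_pos h7]
            obtain ⟨r, rfl⟩ := (PySem.Chars.startswith_iff _ _).mp h7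
            have hspan : alphaSpan ("file://".toList ++ r) = ("file".toList, ':' :: '/' :: '/' :: r) := by
              simp [alphaSpan, PySem.Chars.isalpha, PySem.Chars.isupper, PySem.Chars.islower]
            rw [hspan]
            simp [pvSchemeType, PySem.Dict.get?]
          · rw [if_neg h7]
            -- no scheme prefix matches: both sides are none
            have h3a : ¬ PySem.Chars.startswith l "ftp://".toList = true := by
              intro hc; exact h3 (by rw [hc]; simp)
            have h3b : ¬ PySem.Chars.startswith l "ftps://".toList = true := by
              intro hc; exact h3 (by rw [hc]; simp)
            have h3c : ¬ PySem.Chars.startswith l "ftpse://".toList = true := by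
              intro hc; exact h3 (by rw [hc]; simp)
            by_cases htake : (alphaSpan l).2.take 3 = "://".toList
            · rw [if_pos htake]
              obtain ⟨rest, hrest⟩ : ∃ rest, (alphaSpan l).2 = ':' :: '/' :: '/' :: rest := by
                rcases hp : (alphaSpan l).2 with _ | ⟨c1, _ | ⟨c2, _ | ⟨c3, rest⟩⟩⟩ <;>
                  rw [hp] at htake <;> simp at htake
                obtain ⟨e1, e2, e3⟩ := htake
                exact ⟨rest, by rw [e1, e2, e3]⟩
              have hl : l = (alphaSpan l).1 ++ ':' :: '/' :: '/' :: rest := by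
                conv_lhs => rw [alphaSpan_append l]
                rw [hrest]
              rcases hv : pvSchemeType.get? (String.ofList (alphaSpan l).1) with _ | v
              · rfl
              · exfalso
                rcases schemeType_keys _ _ hv with ha | ha | ha | ha | ha | ha | ha <;> rw [ha] at hl
                · exact h1 ((PySem.Chars.startswith_iff _ _).mpr ⟨rest, hl.symm⟩)
                · exact h2 ((PySem.Chars.startswith_iff _ _).mpr ⟨rest, hl.symm⟩)
                · exact h3a ((PySem.Chars.startswith_iff _ _).mpr ⟨rest, hl.symm⟩)
                · exact h3b ((PySem.Chars.startswith_iff _ _).mpr ⟨rest, hl.symm⟩)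
                · exact h3c ((PySem.Chars.startswith_iff _ _).mpr ⟨rest, hl.symm⟩)
                · exact h6 ((PySem.Chars.startswith_iff _ _).mpr ⟨rest, hl.symm⟩)
                · exact h7 ((PySem.Chars.startswith_iff _ _).mpr ⟨rest, hl.symm⟩)
            · rw [if_neg htake]

-- ===== VERDICT (by name: the statement is the Claim_ definition above) =====
theorem autodetect_resource_type_spec : Claim_equal_autodetect_resource_type := by
  intro full_url _
  unfold Spec_autodetect_resource_type
  cases full_url with
  | none => rfl
  | some fu =>
    simp only [autodetect_resource_type, autodetect_resource_type_alt, PySem.Str.startswith_eq]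
    rw [sel_eq]
    exact chain_eq_scan _
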